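-- pv_equiv track=rewrite | github.com/aalnajim/TSN_Security | main.py | computeListOfCollisionsForAFlowInEgressPort
-- ===== SOURCE A (Python) =====
-- def computeListOfCollisionsperFlowByEgressPort(collisionList,collisionLocation):
--     # This method takes two parameters:
--     # (1) The list 'collisionList', which has all distinct collisions in the form of (firstTSNFlow, firstTSNFlow, collisionLocations)
--     # (2) The collisionLocation in the form of string as follow "(2,3)"
--     #Then, it returns the list 'result', which has all the collisions in that location in the form of (firstTSNFlow, listOfCollidedTSNFlows)
--
--     result = []             # A list of all collisions in 'collisionLocation' in the form of (firstTSNFlow, listOfCollidedTSNFlows)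
--     reigsteredTSNFlows = []
--     for listItem in collisionList:
--         if(collisionLocation in listItem.__getitem__(2)):
--             if(listItem.__getitem__(0) in reigsteredTSNFlows):
--                 theFirstFlowIndex = reigsteredTSNFlows.index(listItem.__getitem__(0))
--                 ((result.__getitem__(theFirstFlowIndex)).__getitem__(1)).append(listItem.__getitem__(1))
--             else:
--                 result.append((listItem.__getitem__(0),[listItem.__getitem__(1)]))
--                 reigsteredTSNFlows.append(listItem.__getitem__(0))
--             if(listItem.__getitem__(1) in reigsteredTSNFlows):
--                 theSecondFlowIndex = reigsteredTSNFlows.index(listItem.__getitem__(1))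
--                 ((result.__getitem__(theSecondFlowIndex)).__getitem__(1)).append(listItem.__getitem__(0))
--             else:
--                 result.append((listItem.__getitem__(1), [listItem.__getitem__(0)]))
--                 reigsteredTSNFlows.append(listItem.__getitem__(1))
--
--     return result
--
-- def computeListOfCollisionsForAFlowInEgressPort(collisionList,collisionLocation,TSNFlow):
--     # This method takes three parameters:
--     # (1) The list 'collisionList', which has all distinct collisions in the form of (firstTSNFlow, firstTSNFlow, collisionLocations)
--     # (2) The collisionLocation in the form of string as follow "(2,3)"
--     # (3) The targeted 'TSNFlow'
--     #Then, it returns the list 'result', which has all TSN Flows collided with 'TSNFlow' in 'collisionLocation' in the form of 'listOfCollidedTSNFlows'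
--
--     result = []
--     tempList = computeListOfCollisionsperFlowByEgressPort(collisionList,collisionLocation)
--     for listItem in tempList:
--         if (listItem.__getitem__(0)== TSNFlow):
--             result = listItem.__getitem__(1)
--             break
--
--
--     return result
-- ===== SOURCE B (Python) =====
-- def computeListOfCollisionsForAFlowInEgressPort(collisionList, collisionLocation, TSNFlow):
--     # Single direct pass: collect partners of TSNFlow at collisionLocation,
--     # instead of grouping all flows and then selecting one.
--     result = []
--     for first, second, locations in collisionList:
--         if collisionLocation in locations:
--             if first == TSNFlow:
--                 result.append(second)
--             if second == TSNFlow: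
--                 result.append(first)
--     return result
-- ===== Notes on version B (the rewrite author's own statement) =====
-- stated objective: simpler
-- what changed: B replaces the group-all-flows helper plus registered-flows index scan with one direct pass over collisionList that appends only the target flow's partners.
import Mathlib
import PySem

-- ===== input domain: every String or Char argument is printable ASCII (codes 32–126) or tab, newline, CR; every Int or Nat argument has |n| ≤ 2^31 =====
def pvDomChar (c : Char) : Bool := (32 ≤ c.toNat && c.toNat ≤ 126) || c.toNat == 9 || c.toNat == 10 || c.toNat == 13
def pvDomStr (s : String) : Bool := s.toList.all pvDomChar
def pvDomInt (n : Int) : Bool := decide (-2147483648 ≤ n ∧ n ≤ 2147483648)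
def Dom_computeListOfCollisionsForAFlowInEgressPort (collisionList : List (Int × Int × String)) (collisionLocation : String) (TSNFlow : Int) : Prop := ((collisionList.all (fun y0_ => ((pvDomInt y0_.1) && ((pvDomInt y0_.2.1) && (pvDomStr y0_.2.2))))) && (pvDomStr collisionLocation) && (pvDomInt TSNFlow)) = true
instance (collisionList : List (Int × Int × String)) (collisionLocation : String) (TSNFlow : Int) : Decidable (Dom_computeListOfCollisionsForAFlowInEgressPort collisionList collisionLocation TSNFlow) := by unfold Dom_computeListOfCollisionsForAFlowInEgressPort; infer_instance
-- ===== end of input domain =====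

-- B replaces A's group-all-flows helper (result/registered index lists) by one direct pass
-- collecting only the target flow's partners; objective: simpler.

-- ===== PORT A =====
-- A's twice-repeated register block: record that flow f collided with partner v.
-- State is (result, reigsteredTSNFlows); the `none` match arm is unreachable
-- (index? is some exactly when the membership test just succeeded) and only makes the port total.
def pvRegister (st : List (Int × List Int) × List Int) (f v : Int) :
    List (Int × List Int) × List Int :=
  if st.2.contains f then
    match PySem.List.index? st.2 f with
    | some theFlowIndex => (st.1.modify theFlowIndex (fun p => (p.1, p.2 ++ [v])), st.2)
    | none => st
  else (st.1 ++ [(f, [v])], st.2 ++ [f])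

-- one iteration of the loop of computeListOfCollisionsperFlowByEgressPort
def pvAStep (collisionLocation : String) (st : List (Int × List Int) × List Int)
    (listItem : Int × Int × String) : List (Int × List Int) × List Int :=
  if PySem.Str.isIn collisionLocation listItem.2.2 then
    pvRegister (pvRegister st listItem.1 listItem.2.1) listItem.2.1 listItem.1
  else st

def computeListOfCollisionsperFlowByEgressPort (collisionList : List (Int × Int × String))
    (collisionLocation : String) : List (Int × List Int) :=
  (collisionList.foldl (pvAStep collisionLocation) ([], [])).1

-- the second loop of A: first entry whose flow equals TSNFlow, else the initial []
def pvAFind (tempList : List (Int × List Int)) (TSNFlow : Int) : List Int :=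
  match tempList with
  | [] => []
  | listItem :: rest => if listItem.1 == TSNFlow then listItem.2 else pvAFind rest TSNFlow

def computeListOfCollisionsForAFlowInEgressPort (collisionList : List (Int × Int × String)) (collisionLocation : String) (TSNFlow : Int) : List Int :=
  pvAFind (computeListOfCollisionsperFlowByEgressPort collisionList collisionLocation) TSNFlow

-- ===== PORT B =====
-- loop body of Source B: two independent ifs, appending in the same order
def pvBStep (collisionLocation : String) (TSNFlow : Int) (result : List Int)
    (item : Int × Int × String) : List Int :=
  if PySem.Str.isIn collisionLocation item.2.2 then
    let result := if item.1 == TSNFlow then result ++ [item.2.1] else result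
    if item.2.1 == TSNFlow then result ++ [item.1] else result
  else result

def computeListOfCollisionsForAFlowInEgressPort_alt (collisionList : List (Int × Int × String)) (collisionLocation : String) (TSNFlow : Int) : List Int :=
  collisionList.foldl (pvBStep collisionLocation TSNFlow) []

-- ===== PRECONDITION & SPEC =====
def Spec_computeListOfCollisionsForAFlowInEgressPort (collisionList : List (Int × Int × String)) (collisionLocation : String) (TSNFlow : Int) (out : List Int) : Prop := out = computeListOfCollisionsForAFlowInEgressPort_alt collisionList collisionLocation TSNFlow
instance (collisionList : List (Int × Int × String)) (collisionLocation : String) (TSNFlow : Int) (out : List Int) : Decidable (Spec_computeListOfCollisionsForAFlowInEgressPort collisionList collisionLocation TSNFlow out) := by unfold Spec_computeListOfCollisionsForAFlowInEgressPort; infer_instance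

-- ===== CLAIM (what is proved, stated in full; the proofs are below) =====
def Claim_equal_computeListOfCollisionsForAFlowInEgressPort : Prop := ∀ (collisionList : List (Int × Int × String)) (collisionLocation : String) (TSNFlow : Int), Dom_computeListOfCollisionsForAFlowInEgressPort collisionList collisionLocation TSNFlow → Spec_computeListOfCollisionsForAFlowInEgressPort collisionList collisionLocation TSNFlow (computeListOfCollisionsForAFlowInEgressPort collisionList collisionLocation TSNFlow)

-- ===== LEMMAS AND PROOFS =====

-- first entry of the grouping state whose flow is f
def pvLook : List (Int × List Int) → Int → Option (List Int)
  | [], _ => none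
  | (a, l) :: t, f => if a = f then some l else pvLook t f

lemma pvLook_eq_none_iff (st : List (Int × List Int)) (f : Int) :
    pvLook st f = none ↔ f ∉ st.map Prod.fst := by
  induction st with
  | nil => simp [pvLook]
  | cons hd tl ih =>
    obtain ⟨a, l⟩ := hd
    by_cases h : a = f <;> simp [pvLook, h, ih, Ne.symm]

lemma pvLook_append_singleton (st : List (Int × List Int)) (g : Int) (L : List Int) (T : Int) :
    pvLook (st ++ [(g, L)]) T =
      match pvLook st T with
      | some l => some l
      | none => if g = T then some L else none := by
  induction st with
  | nil => simp [pvLook]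
  | cons hd tl ih =>
    obtain ⟨a, l⟩ := hd
    by_cases h : a = T <;> simp [pvLook, h, ih]

lemma pvMapFst_modify (st : List (Int × List Int)) (i : Nat) (v : Int) :
    (st.modify i (fun p => (p.1, p.2 ++ [v]))).map Prod.fst = st.map Prod.fst := by
  induction st generalizing i with
  | nil => simp
  | cons hd tl ih =>
    cases i with
    | zero => simp [List.modify]
    | succ j =>
      have hc : (hd :: tl).modify (j+1) (fun p => (p.1, p.2 ++ [v]))
          = hd :: tl.modify j (fun p => (p.1, p.2 ++ [v])) := by simp [List.modify]
      rw [hc]; simp [ih j]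

lemma pvLook_modify (st : List (Int × List Int)) (f T v : Int) (i : Nat)
    (hi : PySem.List.index? (st.map Prod.fst) f = some i) :
    pvLook (st.modify i (fun p => (p.1, p.2 ++ [v]))) T =
      if T = f then (pvLook st f).map (· ++ [v]) else pvLook st T := by
  induction st generalizing i with
  | nil => simp [PySem.List.index?] at hi
  | cons hd tl ih =>
    obtain ⟨a, l⟩ := hd
    simp only [List.map_cons] at hi
    by_cases haf : a = f
    · subst haf
      rw [PySem.List.index?_cons_self] at hi
      obtain rfl : (0 : Nat) = i := Option.some_injective _ hi
      by_cases hT : T = a <;> simp [pvLook, hT, List.modify, Ne.symm]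
    · rw [PySem.List.index?_cons_of_ne _ haf] at hi
      obtain ⟨j, hj, hji⟩ := Option.map_eq_some_iff.mp hi
      subst hji
      have hc : ((a, l) :: tl).modify (j+1) (fun p => (p.1, p.2 ++ [v]))
          = (a, l) :: tl.modify j (fun p => (p.1, p.2 ++ [v])) := by simp [List.modify]
      rw [hc]
      by_cases hT : T = f
      · subst hT
        simp [pvLook, haf, ih j hj]
      · by_cases haT : a = T <;> simp [pvLook, haT, hT, ih j hj]

-- A's register block preserves: registered = result.map fst, and the target flow's
-- entry (read as [] when absent) gains v exactly when f is the target flow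
lemma pvRegister_invariant (st : List (Int × List Int) × List Int) (f v T : Int)
    (h : st.2 = st.1.map Prod.fst) :
    (pvRegister st f v).2 = (pvRegister st f v).1.map Prod.fst ∧
    (pvLook (pvRegister st f v).1 T).getD [] =
      (if f = T then (pvLook st.1 T).getD [] ++ [v] else (pvLook st.1 T).getD []) := by
  obtain ⟨res, reg⟩ := st
  simp only at h
  subst h
  unfold pvRegister
  by_cases hmem : f ∈ res.map Prod.fst
  · have hc : (res.map Prod.fst).contains f = true := by simpa using hmem
    obtain ⟨i, hi⟩ := Option.isSome_iff_exists.mp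
      ((PySem.List.index?_isSome_iff (res.map Prod.fst) f).mpr hmem)
    simp only [hc, if_pos, hi]
    refine ⟨(pvMapFst_modify res i v).symm, ?_⟩
    rw [pvLook_modify res f T v i hi]
    by_cases hT : T = f
    · subst hT
      have hne : pvLook res T ≠ none := fun hn => ((pvLook_eq_none_iff _ _).mp hn) hmem
      obtain ⟨l, hl⟩ := Option.ne_none_iff_exists'.mp hne
      simp [hl]
    · simp [hT, Ne.symm hT]
  · have hnone : pvLook res f = none := (pvLook_eq_none_iff res f).mpr hmem
    rw [if_neg (by simpa using hmem)]
    refine ⟨by simp, ?_⟩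
    rw [pvLook_append_singleton]
    by_cases hT : f = T
    · subst hT; simp [hnone]
    · cases hv : pvLook res T <;> simp [hT]

-- one step of A's grouping evolves the target flow's entry exactly as one step of B
lemma pvStep_invariant (collisionLocation : String) (TSNFlow : Int)
    (item : Int × Int × String) (st : List (Int × List Int) × List Int)
    (h : st.2 = st.1.map Prod.fst) :
    (pvAStep collisionLocation st item).2 = (pvAStep collisionLocation st item).1.map Prod.fst ∧
    (pvLook (pvAStep collisionLocation st item).1 TSNFlow).getD [] =
      pvBStep collisionLocation TSNFlow ((pvLook st.1 TSNFlow).getD []) item := by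
  unfold pvAStep pvBStep
  by_cases hloc : PySem.Str.isIn collisionLocation item.2.2
  · simp only [hloc, if_pos]
    obtain ⟨h1, e1⟩ := pvRegister_invariant st item.1 item.2.1 TSNFlow h
    obtain ⟨h2, e2⟩ := pvRegister_invariant (pvRegister st item.1 item.2.1) item.2.1 item.1 TSNFlow h1
    refine ⟨h2, ?_⟩
    rw [e2, e1]
    by_cases hs : item.2.1 = TSNFlow <;> by_cases hf : item.1 = TSNFlow <;>
      simp [hs, hf]
  · simp only [PySem.Str.isIn] at hloc
    simp [hloc, h]

lemma pvFold_eq (collisionLocation : String) (TSNFlow : Int) :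
    ∀ (items : List (Int × Int × String)) (st : List (Int × List Int) × List Int)
      (acc : List Int),
      st.2 = st.1.map Prod.fst →
      (pvLook st.1 TSNFlow).getD [] = acc →
      (pvLook (items.foldl (pvAStep collisionLocation) st).1 TSNFlow).getD [] =
        items.foldl (pvBStep collisionLocation TSNFlow) acc := by
  intro items
  induction items with
  | nil => intro st acc h he; simpa using he
  | cons hd tl ih =>
    intro st acc h he
    obtain ⟨h1, e1⟩ := pvStep_invariant collisionLocation TSNFlow hd st h
    simp only [List.foldl_cons]
    exact ih _ _ h1 (by rw [e1, he])

lemma pvAFind_eq_look (tempList : List (Int × List Int)) (TSNFlow : Int) :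
    pvAFind tempList TSNFlow = (pvLook tempList TSNFlow).getD [] := by
  induction tempList with
  | nil => simp [pvAFind, pvLook]
  | cons hd tl ih =>
    obtain ⟨a, l⟩ := hd
    by_cases h : a = TSNFlow <;> simp [pvAFind, pvLook, h, ih]

-- ===== VERDICT (by name: the statement is the Claim_ definition above) =====
theorem computeListOfCollisionsForAFlowInEgressPort_spec : Claim_equal_computeListOfCollisionsForAFlowInEgressPort := by
  intro collisionList collisionLocation TSNFlow _
  unfold Spec_computeListOfCollisionsForAFlowInEgressPort
  unfold computeListOfCollisionsForAFlowInEgressPort computeListOfCollisionsperFlowByEgressPort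
    computeListOfCollisionsForAFlowInEgressPort_alt
  rw [pvAFind_eq_look]
  exact pvFold_eq collisionLocation TSNFlow collisionList ([], []) [] rfl rfl
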